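-- pv_equiv track=rewrite | github.com/nummer1/AcandoNCAAactionrecognition | Utility.py | get_section
-- ===== SOURCE A (Python) =====
-- def get_section(vector):
--     '''
--     vector length 20 cointaining a 1 for start frame and a 1 for end frame rest 0
--     :param vector:
--     :return: list of integers which correspond to the section
--     '''
--     section = []
--     event_started = False
--     for i in range(0,len(vector)):
--         if vector[i] == 1 and event_started == True:
--             # end of action
--             section.append(i)
--             return section
--
--         if vector[i] == 1 and event_started == False:
--             # set begin of action
--             event_started = True
--
--         if event_started == True:
--             # append discret time
--             section.append(i)
--
--     return section
-- ===== SOURCE B (Python) =====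
-- def get_section(vector):
--     ones = [i for i, v in enumerate(vector) if v == 1]
--     if not ones:
--         return []
--     if len(ones) >= 2:
--         return list(range(ones[0], ones[1] + 1))
--     return list(range(ones[0], len(vector)))
-- ===== Notes on version B (the rewrite author's own statement) =====
-- stated objective: simpler
-- what changed: Replaces A's stateful single pass (event_started flag, growing accumulator, early return) by locating the marker-1 positions once with a comprehension and returning the answer as a single closed-form range over the first one or two marker indices.
import Mathlib
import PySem

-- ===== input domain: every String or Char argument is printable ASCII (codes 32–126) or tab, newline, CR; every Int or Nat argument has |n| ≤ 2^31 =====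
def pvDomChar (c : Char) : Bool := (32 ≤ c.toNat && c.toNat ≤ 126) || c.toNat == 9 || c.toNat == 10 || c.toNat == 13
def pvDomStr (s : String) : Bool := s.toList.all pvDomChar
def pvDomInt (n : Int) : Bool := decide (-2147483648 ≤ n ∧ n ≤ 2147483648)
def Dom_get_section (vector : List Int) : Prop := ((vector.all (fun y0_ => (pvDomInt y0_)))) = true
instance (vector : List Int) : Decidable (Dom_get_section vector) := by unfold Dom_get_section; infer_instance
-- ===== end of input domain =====

-- B replaces A's flag-driven accumulation loop by locating the marker positions once and
-- constructing the answer as a closed-form range (objective: simpler).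

-- ===== PORT A =====
-- A's for-loop over range(len(vector)) with the early return, the `event_started` flag
-- and the growing `section` list, as structural recursion over the list with the index.
def getSectionLoop : List Int → Int → List Int → Bool → List Int
  | [], _, sec, _ => sec
  | v :: rest, i, sec, started =>
    if v = 1 ∧ started = true then sec ++ [i]          -- end of action: append and return
    else
      let started' := if v = 1 ∧ started = false then true else started
      let sec' := if started' = true then sec ++ [i] else sec
      getSectionLoop rest (i + 1) sec' started'

def get_section (vector : List Int) : List Int :=
  getSectionLoop vector 0 [] false

-- ===== PORT B =====
def get_section_alt (vector : List Int) : List Int :=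
  let ones := ((PySem.List.enumerate vector 0).filter (fun p => p.2 == 1)).map (fun p => p.1)
  match ones with
  | [] => []
  | [a] => PySem.List.pyRange a (vector.length : Int) 1
  | a :: b :: _ => PySem.List.pyRange a (b + 1) 1

-- ===== PRECONDITION & SPEC =====
def Spec_get_section (vector : List Int) (out : List Int) : Prop := out = get_section_alt vector
instance (vector : List Int) (out : List Int) : Decidable (Spec_get_section vector out) := by unfold Spec_get_section; infer_instance

-- ===== CLAIM (what is proved, stated in full; the proofs are below) =====
def Claim_equal_get_section : Prop := ∀ (vector : List Int), Dom_get_section vector → Spec_get_section vector (get_section vector)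

-- ===== LEMMAS AND PROOFS =====

-- the marker positions of v when its first element has index i
def onesF (v : List Int) (i : Int) : List Int :=
  ((PySem.List.enumerate v i).filter (fun p => p.2 == 1)).map (fun p => p.1)

theorem onesF_nil (i : Int) : onesF [] i = [] := rfl

theorem onesF_cons (x : Int) (rest : List Int) (i : Int) :
    onesF (x :: rest) i =
      if x = 1 then i :: onesF rest (i + 1) else onesF rest (i + 1) := by
  simp only [onesF, PySem.List.enumerate_cons, List.filter_cons]
  by_cases h : x = 1 <;> simp [h]

theorem onesF_lb (v : List Int) (i x : Int) (hx : x ∈ onesF v i) : i ≤ x := by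
  induction v generalizing i with
  | nil => simp [onesF_nil] at hx
  | cons y rest ih =>
    rw [onesF_cons] at hx
    by_cases h : y = 1
    · simp [h] at hx
      rcases hx with h1 | h1
      · omega
      · have := ih (i + 1) h1; omega
    · simp [h] at hx
      have := ih (i + 1) hx; omega

theorem loop_started (v : List Int) (i : Int) (sec : List Int) :
    getSectionLoop v i sec true =
      sec ++ (match onesF v i with
              | [] => PySem.List.pyRange i (i + (v.length : Int)) 1
              | b :: _ => PySem.List.pyRange i (b + 1) 1) := by
  induction v generalizing i sec with
  | nil => simp [getSectionLoop, onesF_nil, PySem.List.pyRange_one_eq_nil]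
  | cons x rest ih =>
    rw [onesF_cons]
    by_cases h : x = 1
    · simp [getSectionLoop, h, PySem.List.pyRange_one_singleton]
    · simp only [getSectionLoop, h]
      norm_num
      rw [ih]
      cases hr : onesF rest (i + 1) with
      | nil =>
        have e : i + ((rest.length : Int) + 1) = i + 1 + (rest.length : Int) := by ring
        simp [e, PySem.List.pyRange_one_cons (show i < i + 1 + (rest.length : Int) by push_cast; omega)]
      | cons b tl =>
        have hb : i + 1 ≤ b := onesF_lb rest (i + 1) b (by rw [hr]; exact List.mem_cons_self ..)
        simp [PySem.List.pyRange_one_cons (show i < b + 1 by omega)]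

theorem loop_notStarted (v : List Int) (i : Int) :
    getSectionLoop v i [] false =
      match onesF v i with
      | [] => []
      | [a] => PySem.List.pyRange a (i + (v.length : Int)) 1
      | a :: b :: _ => PySem.List.pyRange a (b + 1) 1 := by
  induction v generalizing i with
  | nil => simp [getSectionLoop, onesF_nil]
  | cons x rest ih =>
    rw [onesF_cons]
    by_cases h : x = 1
    · simp only [getSectionLoop, h]
      norm_num
      rw [loop_started rest (i + 1) [i]]
      cases hr : onesF rest (i + 1) with
      | nil =>
        have e : i + ((rest.length : Int) + 1) = i + 1 + (rest.length : Int) := by ring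
        simp [e, PySem.List.pyRange_one_cons (show i < i + 1 + (rest.length : Int) by push_cast; omega)]
      | cons b tl =>
        have hb : i + 1 ≤ b := onesF_lb rest (i + 1) b (by rw [hr]; exact List.mem_cons_self ..)
        simp [PySem.List.pyRange_one_cons (show i < b + 1 by omega)]
    · simp only [getSectionLoop, h]
      norm_num
      rw [ih]
      cases hr : onesF rest (i + 1) with
      | nil => simp
      | cons a tl =>
        cases tl with
        | nil =>
          congr 1
          ring_nf
        | cons b tl' => simp

-- ===== VERDICT (by name: the statement is the Claim_ definition above) =====
theorem get_section_spec : Claim_equal_get_section := by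
  intro vector _
  show get_section vector = get_section_alt vector
  unfold get_section get_section_alt
  rw [loop_notStarted vector 0]
  show _ = (match onesF vector 0 with
            | [] => []
            | [a] => PySem.List.pyRange a (vector.length : Int) 1
            | a :: b :: _ => PySem.List.pyRange a (b + 1) 1)
  simp
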